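-- pv_equiv track=rewrite | github.com/ayushidubal/FTCircuitBench | misc/plot_pbc_reduction_by_circuit.py | wrap_axis_label
-- ===== SOURCE A (Python) =====
-- def wrap_axis_label(label: str, max_chars: int = 26) -> str:
--     label = str(label)
--     if len(label) <= max_chars:
--         return label
--     parts = label.split(" ")
--     if len(parts) <= 1:
--         return label
--     target = len(label) // 2
--     best_idx = 0
--     best_delta = 10**9
--     cur_len = 0
--     for i, w in enumerate(parts[:-1], start=1):
--         cur_len += len(w) + 1
--         delta = abs(cur_len - 1 - target)
--         if delta < best_delta:
--             best_delta = delta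
--             best_idx = i
--     return " ".join(parts[:best_idx]) + "\n" + " ".join(parts[best_idx:])
-- ===== SOURCE B (Python) =====
-- def wrap_axis_label(label: str, max_chars: int = 26) -> str:
--     label = str(label)
--     if len(label) <= max_chars or " " not in label:
--         return label
--     target = len(label) // 2
--     # Sentinel space at position 0: cutting there reproduces the unsplit-prefix
--     # fallback without any branch.  10**9 is the spec's "no break yet" delta.
--     s = " " + label
--     best = 0
--     best_delta = 10 ** 9
--     for j, ch in enumerate(s):
--         if ch == " ":
--             d = abs(j - 1 - target)
--             if d < best_delta:
--                 best_delta = d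
--                 best = j
--     return s[1:best] + "\n" + s[best + 1:]
-- ===== Notes on version B (the rewrite author's own statement) =====
-- stated objective: alternative
-- what changed: B never builds the word list: it scans the raw string (with one sentinel space prepended, so the no-improvement fallback needs no branch) for the space index closest to the midpoint and splices the result with two slices, instead of splitting into words, accumulating word lengths in a loop, and re-joining two word sublists.
import Mathlib
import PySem

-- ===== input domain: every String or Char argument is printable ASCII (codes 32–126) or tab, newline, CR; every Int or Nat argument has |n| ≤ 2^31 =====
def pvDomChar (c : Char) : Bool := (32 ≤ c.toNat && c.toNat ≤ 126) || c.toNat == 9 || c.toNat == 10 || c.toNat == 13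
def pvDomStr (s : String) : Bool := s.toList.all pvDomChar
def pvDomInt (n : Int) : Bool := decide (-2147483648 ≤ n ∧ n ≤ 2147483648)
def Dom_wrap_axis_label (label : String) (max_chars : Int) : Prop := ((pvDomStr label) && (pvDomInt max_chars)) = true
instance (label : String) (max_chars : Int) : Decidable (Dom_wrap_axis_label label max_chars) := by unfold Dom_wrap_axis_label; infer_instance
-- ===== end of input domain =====

-- B: one scan over the raw string (sentinel space prepended) instead of split/accumulate/join; alternative decomposition, same O(n) cost.


-- ===== PORT A =====
-- Literal port of A: split into words, loop over all but the last word
-- accumulating the running length, pick the word boundary whose space is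
-- closest to the midpoint (strict improvement, sentinel 10^9), re-join.
def wrap_axis_label (label : String) (max_chars : Int) : String :=
  let cs := label.toList
  if PySem.Chars.len cs ≤ max_chars then label
  else
    let parts := PySem.Chars.splitOn cs [' ']
    if (parts.length : Int) ≤ 1 then label
    else
      let target := PySem.Int.floordiv (PySem.Chars.len cs) 2
      let r := (PySem.List.enumerate (PySem.List.slice parts none (some (-1))) 1).foldl
          (fun (st : (Int × Int) × Int) iw =>
            let cur := st.2 + PySem.Chars.len iw.2 + 1
            (if |cur - 1 - target| < st.1.1 then (|cur - 1 - target|, iw.1) else st.1, cur))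
          ((1000000000, 0), 0)
      String.ofList (PySem.Chars.join [' '] (PySem.List.slice parts none (some r.1.2))
        ++ '\n' :: PySem.Chars.join [' '] (PySem.List.slice parts (some r.1.2) none))

-- ===== PORT B =====
-- Literal port of B: scan ' ' :: label for the space nearest the midpoint.
def wrap_axis_label_alt (label : String) (max_chars : Int) : String :=
  let cs := label.toList
  if PySem.Chars.len cs ≤ max_chars ∨ PySem.Chars.isIn [' '] cs = false then label
  else
    let target := PySem.Int.floordiv (PySem.Chars.len cs) 2
    let s := ' ' :: cs
    let r := (PySem.List.enumerate s 0).foldl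
        (fun (st : Int × Int) p =>
          if p.2 = ' ' then
            if |p.1 - 1 - target| < st.1 then (|p.1 - 1 - target|, p.1) else st
          else st)
        (1000000000, 0)
    String.ofList (PySem.List.slice s (some 1) (some r.2)
      ++ '\n' :: PySem.List.slice s (some (r.2 + 1)) none)

-- ===== PRECONDITION & SPEC =====
def Spec_wrap_axis_label (label : String) (max_chars : Int) (out : String) : Prop := out = wrap_axis_label_alt label max_chars
instance (label : String) (max_chars : Int) (out : String) : Decidable (Spec_wrap_axis_label label max_chars out) := by unfold Spec_wrap_axis_label; infer_instance

-- ===== CLAIM (what is proved, stated in full; the proofs are below) =====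
def Claim_equal_wrap_axis_label : Prop := ∀ (label : String) (max_chars : Int), Dom_wrap_axis_label label max_chars → Spec_wrap_axis_label label max_chars (wrap_axis_label label max_chars)


-- ===== LEMMAS AND PROOFS =====

-- running argmin with strict improvement (first minimum wins)
def pvSel (s : Int × Int) (l : List (Int × Int)) : Int × Int :=
  l.foldl (fun s c => if c.1 < s.1 then c else s) s

-- structural characterisation of splitting on a single space
def pvSpl : List Char → List (List Char)
  | [] => [[]]
  | c :: rest => if c = ' ' then [] :: pvSpl rest else (pvSpl rest).modifyHead (c :: ·)

theorem pvSpl_ne_nil (cs : List Char) : pvSpl cs ≠ [] := by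
  cases cs with
  | nil => simp [pvSpl]
  | cons c rest =>
    simp only [pvSpl]
    split_ifs
    · simp
    · cases h : pvSpl rest with
      | nil => exact absurd h (pvSpl_ne_nil rest)
      | cons a l => simp

theorem pvSplitOn_go_eq (fuel : Nat) (l cur : List Char) (acc : List (List Char))
    (h : l.length ≤ fuel) :
    PySem.Chars.splitOn.go [' '] fuel l cur acc
      = acc.reverse ++ (pvSpl l).modifyHead (cur.reverse ++ ·) := by
  induction fuel generalizing l cur acc with
  | zero =>
    interval_cases hl : l.length
    · rw [List.length_eq_zero_iff] at hl
      subst hl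
      simp [PySem.Chars.splitOn.go, pvSpl]
  | succ fuel ih =>
    cases l with
    | nil => simp [PySem.Chars.splitOn.go, pvSpl]
    | cons c rest =>
      simp only [PySem.Chars.splitOn.go]
      by_cases hc : c = ' '
      · subst hc
        rw [if_pos (by simp [List.isPrefixOf])]
        rw [ih _ _ _ (by simpa using Nat.le_of_succ_le_succ (by simpa using h))]
        simp only [pvSpl, ite_true]
        cases h2 : pvSpl rest with
        | nil => exact absurd h2 (pvSpl_ne_nil rest)
        | cons a l => simp [h2, List.modifyHead]
      · rw [if_neg (by simp [List.isPrefixOf]; exact fun hh => absurd hh.symm hc)]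
        rw [ih _ _ _ (by simpa using Nat.le_of_succ_le_succ (by simpa using h))]
        simp only [pvSpl, if_neg hc]
        cases hsp : pvSpl rest with
        | nil => exact absurd hsp (pvSpl_ne_nil rest)
        | cons a t => simp [List.modifyHead]

theorem pvSplitOn_eq (cs : List Char) : PySem.Chars.splitOn cs [' '] = pvSpl cs := by
  show PySem.Chars.splitOn.go [' '] (cs.length + 1) cs [] [] = pvSpl cs
  rw [pvSplitOn_go_eq _ _ _ _ (by omega)]
  cases h : pvSpl cs with
  | nil => exact absurd h (pvSpl_ne_nil cs)
  | cons a t => simp [List.modifyHead]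

theorem pvSpl_length (cs : List Char) : (pvSpl cs).length = cs.count ' ' + 1 := by
  induction cs with
  | nil => simp [pvSpl]
  | cons c rest ih =>
    simp only [pvSpl]
    by_cases hc : c = ' '
    · subst hc; simp [ih]
    · rw [if_neg hc]
      cases h : pvSpl rest with
      | nil => exact absurd h (pvSpl_ne_nil rest)
      | cons a t =>
        simp [hc, h] at ih ⊢
        simpa [Ne.symm hc] using ih

theorem pvSpl_nospace (cs : List Char) : ∀ w ∈ pvSpl cs, ' ' ∉ w := by
  induction cs with
  | nil => simp [pvSpl]
  | cons c rest ih =>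
    simp only [pvSpl]
    by_cases hc : c = ' '
    · subst hc; simpa using ih
    · rw [if_neg hc]
      cases h : pvSpl rest with
      | nil => exact absurd h (pvSpl_ne_nil rest)
      | cons a t =>
        rw [h] at ih
        intro w hw
        simp [List.modifyHead] at hw
        rcases hw with rfl | hw
        · intro hmem
          rcases List.mem_cons.mp hmem with rfl | hmem
          · exact hc rfl
          · exact ih a (by simp) hmem
        · exact ih w (by simp [hw])

theorem pvIntercalate_cons (w : List Char) (xs : List (List Char)) (h : xs ≠ []) :
    [' '].intercalate (w :: xs) = w ++ ' ' :: [' '].intercalate xs := by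
  cases xs with
  | nil => simp at h
  | cons y ys => simp [List.intercalate, List.intersperse]

theorem pvIntercalate_pvSpl (cs : List Char) : [' '].intercalate (pvSpl cs) = cs := by
  induction cs with
  | nil => simp [pvSpl, List.intercalate]
  | cons c rest ih =>
    simp only [pvSpl]
    by_cases hc : c = ' '
    · subst hc
      rw [if_pos rfl, pvIntercalate_cons _ _ (pvSpl_ne_nil rest), ih]
      simp
    · rw [if_neg hc]
      cases h : pvSpl rest with
      | nil => exact absurd h (pvSpl_ne_nil rest)
      | cons a t =>
        rw [h] at ih
        simp only [List.modifyHead]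
        cases t with
        | nil =>
          simp [List.intercalate] at ih ⊢
          exact ih
        | cons b t' =>
          rw [pvIntercalate_cons _ _ (by simp)] at ih
          rw [pvIntercalate_cons _ _ (by simp)]
          simpa using congrArg (c :: ·) ih

-- candidate lists: (delta, word index) for A, (delta, string position) for B
def pvCandA (t : Int) : List (List Char) → Int → Int → List (Int × Int)
  | [], _, _ => []
  | w :: ps, i, cur => (|cur + (w.length : Int) - t|, i) :: pvCandA t ps (i + 1) (cur + w.length + 1)

def pvCandB (t : Int) : List Char → Int → List (Int × Int)
  | [], _ => []
  | c :: l, j => if c = ' ' then (|j - 1 - t|, j) :: pvCandB t l (j + 1) else pvCandB t l (j + 1)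

theorem pvFoldA_eq_sel (t : Int) (ps : List (List Char)) :
    ∀ (i cur : Int) (st : Int × Int),
    ((PySem.List.enumerate ps i).foldl
        (fun (st : (Int × Int) × Int) iw =>
          (if |st.2 + PySem.Chars.len iw.2 + 1 - 1 - t| < st.1.1
            then (|st.2 + PySem.Chars.len iw.2 + 1 - 1 - t|, iw.1) else st.1,
           st.2 + PySem.Chars.len iw.2 + 1))
        (st, cur)).1
      = pvSel st (pvCandA t ps i cur) := by
  induction ps with
  | nil => intro i cur st; simp [PySem.List.enumerate, pvCandA, pvSel]
  | cons w ps ih =>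
    intro i cur st
    rw [PySem.List.enumerate_cons, List.foldl_cons]
    show ((PySem.List.enumerate ps (i + 1)).foldl _
        (if |cur + PySem.Chars.len w + 1 - 1 - t| < st.1
            then (|cur + PySem.Chars.len w + 1 - 1 - t|, i) else st,
         cur + PySem.Chars.len w + 1)).1 = _
    rw [ih]
    simp only [pvCandA, pvSel, List.foldl_cons, PySem.Chars.len_eq]
    congr 2
    · have : cur + (w.length : Int) + 1 - 1 - t = cur + (w.length : Int) - t := by omega
      rw [this]
    · have : cur + (w.length : Int) + 1 - 1 - t = cur + (w.length : Int) - t := by omega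
      rw [this]

theorem pvFoldB_eq_sel (t : Int) (l : List Char) :
    ∀ (j : Int) (st : Int × Int),
    (PySem.List.enumerate l j).foldl
        (fun (st : Int × Int) p =>
          if p.2 = ' ' then
            if |p.1 - 1 - t| < st.1 then (|p.1 - 1 - t|, p.1) else st
          else st)
        st
      = pvSel st (pvCandB t l j) := by
  induction l with
  | nil => intro j st; simp [PySem.List.enumerate, pvCandB, pvSel]
  | cons c l ih =>
    intro j st
    rw [PySem.List.enumerate_cons, List.foldl_cons]
    by_cases hc : c = ' '
    · subst hc
      rw [ih]
      simp [pvCandB, pvSel]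
    · rw [ih]
      simp [pvCandB, hc, pvSel]

theorem pvSel_cons_of_lt (init c : Int × Int) (l : List (Int × Int))
    (hne : l ≠ []) (h : ∀ p ∈ l, p.1 < c.1) :
    pvSel init (c :: l) = pvSel init l := by
  cases l with
  | nil => simp at hne
  | cons d l' =>
    simp only [pvSel, List.foldl_cons]
    congr 1
    by_cases hci : c.1 < init.1
    · rw [if_pos hci, if_pos (h d (by simp)), if_pos (lt_trans (h d (by simp)) hci)]
    · rw [if_neg hci]

theorem pvCandB_mem (t : Int) (l : List Char) :
    ∀ (j : Int), ∀ p ∈ pvCandB t l j, p.1 = |p.2 - 1 - t| ∧ j ≤ p.2 ∧ p.2 < j + l.length := by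
  induction l with
  | nil => intro j p hp; simp [pvCandB] at hp
  | cons c l ih =>
    intro j p hp
    by_cases hc : c = ' '
    · subst hc
      rw [pvCandB, if_pos rfl] at hp
      rcases List.mem_cons.mp hp with rfl | hp
      · exact ⟨rfl, le_refl _, by simp⟩
      · obtain ⟨h1, h2, h3⟩ := ih (j + 1) p hp
        exact ⟨h1, by omega, by simp at h3 ⊢; omega⟩
    · rw [pvCandB, if_neg hc] at hp
      obtain ⟨h1, h2, h3⟩ := ih (j + 1) p hp
      exact ⟨h1, by omega, by simp at h3 ⊢; omega⟩

theorem pvCandB_append (t : Int) (u v : List Char) :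
    ∀ j : Int, pvCandB t (u ++ v) j = pvCandB t u j ++ pvCandB t v (j + u.length) := by
  induction u with
  | nil => intro j; simp [pvCandB]
  | cons c u ih =>
    intro j
    have harg : j + 1 + (u.length : Int) = j + ((u.length : Int) + 1) := by ring
    by_cases hc : c = ' ' <;>
      simp [pvCandB, hc, ih (j + 1), harg]

theorem pvCandB_nospace (t : Int) (u : List Char) (h : ' ' ∉ u) :
    ∀ j : Int, pvCandB t u j = [] := by
  induction u with
  | nil => intro j; simp [pvCandB]
  | cons c u ih =>
    intro j
    rw [pvCandB, if_neg (by intro hc; exact h (hc ▸ List.mem_cons_self))]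
    exact ih (fun hm => h (List.mem_cons_of_mem _ hm)) (j + 1)

theorem pvCandA_length (t : Int) (ps : List (List Char)) :
    ∀ i cur, (pvCandA t ps i cur).length = ps.length := by
  induction ps with
  | nil => intro i cur; simp [pvCandA]
  | cons w ps ih => intro i cur; simp [pvCandA, ih]

-- boundary: length of the first n words plus their following spaces
def pvBnd : List (List Char) → Nat → Nat
  | _, 0 => 0
  | [], _ + 1 => 0
  | w :: ps, n + 1 => w.length + 1 + pvBnd ps n

theorem pvSel_rel (P : Int → Int → Prop) :
    ∀ (l1 l2 : List (Int × Int)),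
    List.Forall₂ (fun p q => p.1 = q.1 ∧ P p.2 q.2) l1 l2 →
    ∀ (a b : Int × Int), a.1 = b.1 → P a.2 b.2 →
    (pvSel a l1).1 = (pvSel b l2).1 ∧ P (pvSel a l1).2 (pvSel b l2).2 := by
  intro l1 l2 h
  induction h with
  | nil => intro a b h1 h2; exact ⟨h1, h2⟩
  | cons hd tl ih =>
    intro a b h1 h2
    simp only [pvSel, List.foldl_cons]
    apply ih
    · simp only [hd.1, h1]
      split_ifs <;> simp [h1, hd.1]
    · simp only [hd.1, h1]
      split_ifs <;> first | exact hd.2 | exact h2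

theorem pvBnd_pos (ps : List (List Char)) (h : ps ≠ []) (n : Nat) : 0 < pvBnd ps (n + 1) := by
  cases ps with
  | nil => simp at h
  | cons w rest => simp [pvBnd]

theorem pvCorr (t : Int) :
    ∀ (ps : List (List Char)), (∀ w ∈ ps, ' ' ∉ w) → ps ≠ [] →
    ∀ (i cur : Int),
    List.Forall₂
      (fun p q => p.1 = q.1 ∧
        ∃ n : Nat, n + 1 < ps.length ∧ p.2 = i + n ∧ q.2 = cur + (pvBnd ps (n + 1) : Int))
      (pvCandA t ps.dropLast i cur)
      (pvCandB t ([' '].intercalate ps) (cur + 1)) := by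
  intro ps
  induction ps with
  | nil => intro _ h; simp at h
  | cons w rest ih =>
    intro hsf _ i cur
    cases rest with
    | nil =>
      have h1 : pvCandA t ([w].dropLast) i cur = [] := by simp [pvCandA]
      have h2 : [' '].intercalate [w] = w := by simp [List.intercalate]
      rw [h1, h2, pvCandB_nospace t w (hsf w (by simp)) _]
      exact List.Forall₂.nil
    | cons w2 rest' =>
      rw [pvIntercalate_cons _ _ (by simp),
        pvCandB_append, pvCandB_nospace t w (hsf w (by simp)) _, List.nil_append]
      have hdl : (w :: w2 :: rest').dropLast = w :: (w2 :: rest').dropLast := by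
        simp [List.dropLast]
      rw [hdl]
      simp only [pvCandA]
      rw [pvCandB, if_pos rfl]
      constructor
      · refine ⟨?_, 0, by simp, by simp, ?_⟩
        · show |cur + (w.length : Int) - t| = |cur + 1 + (w.length : Int) - 1 - t|
          congr 1
          ring
        · show cur + 1 + (w.length : Int) = cur + (pvBnd (w :: w2 :: rest') 1 : Int)
          simp [pvBnd]
          ring
      · have hmain := ih (fun u hu => hsf u (by simp [hu])) (by simp) (i + 1) (cur + w.length + 1)
        have harg : cur + 1 + (w.length : Int) + 1 = (cur + w.length + 1) + 1 := by ring
        rw [harg]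
        refine List.Forall₂.imp ?_ hmain
        rintro p q ⟨hfst, n, hn, hp, hq⟩
        refine ⟨hfst, n + 1, by simpa using Nat.succ_lt_succ hn, by omega, ?_⟩
        rw [hq]
        simp [pvBnd]
        ring

-- join of take/drop of the word list = take/drop of the string at the boundary
theorem pvTakeDropJoin :
    ∀ (n : Nat) (ps : List (List Char)), n + 1 < ps.length →
    [' '].intercalate (ps.take (n + 1)) = ([' '].intercalate ps).take (pvBnd ps (n + 1) - 1)
      ∧ [' '].intercalate (ps.drop (n + 1)) = ([' '].intercalate ps).drop (pvBnd ps (n + 1)) := by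
  intro n
  induction n with
  | zero =>
    intro ps hps
    cases ps with
    | nil => simp at hps
    | cons w rest =>
      have hr : rest ≠ [] := by intro h; subst h; simp at hps
      rw [pvIntercalate_cons _ _ hr]
      constructor
      · have hb : pvBnd (w :: rest) 1 - 1 = w.length + 0 := by simp [pvBnd]
        rw [hb]
        have h2 : [' '].intercalate ((w :: rest).take 1) = w := by simp [List.intercalate]
        rw [h2, List.take_length_add_append 0]
        simp
      · have hb : pvBnd (w :: rest) 1 = w.length + 1 := by simp [pvBnd]
        rw [hb, List.drop_length_add_append 1]
        simp
  | succ n ih =>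
    intro ps hps
    cases ps with
    | nil => simp at hps
    | cons w rest =>
      have hr2 : n + 1 < rest.length := by simpa using hps
      have hr : rest ≠ [] := by intro h; subst h; simp at hr2
      have htk : rest.take (n + 1) ≠ [] := by
        cases rest with
        | nil => exact absurd rfl hr
        | cons a l => simp
      have hbpos : 0 < pvBnd rest (n + 1) := pvBnd_pos rest hr n
      obtain ⟨iht, ihd⟩ := ih rest hr2
      rw [pvIntercalate_cons _ _ hr]
      constructor
      · have hlhs : (w :: rest).take (n + 1 + 1) = w :: rest.take (n + 1) := by simp
        rw [hlhs, pvIntercalate_cons _ _ htk, iht]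
        have hb : pvBnd (w :: rest) (n + 1 + 1) - 1
            = w.length + (1 + (pvBnd rest (n + 1) - 1)) := by
          simp [pvBnd]; omega
        rw [hb, List.take_length_add_append (1 + (pvBnd rest (n + 1) - 1))]
        have : (1 + (pvBnd rest (n + 1) - 1)) = (pvBnd rest (n + 1) - 1) + 1 := by omega
        rw [this, List.take_succ_cons]
      · have hlhs : (w :: rest).drop (n + 1 + 1) = rest.drop (n + 1) := by simp
        rw [hlhs, ihd]
        have hb : pvBnd (w :: rest) (n + 1 + 1) = w.length + (1 + pvBnd rest (n + 1)) := by
          simp [pvBnd]; omega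
        rw [hb, List.drop_length_add_append (1 + pvBnd rest (n + 1))]
        have : 1 + pvBnd rest (n + 1) = pvBnd rest (n + 1) + 1 := by omega
        rw [this, List.drop_succ_cons]

-- assembled equivalence on the main branch
theorem pvMain (label : String) (max_chars : Int)
    (h1 : ¬ PySem.Chars.len label.toList ≤ max_chars)
    (h2 : ¬ ((PySem.Chars.splitOn label.toList [' ']).length : Int) ≤ 1) :
    wrap_axis_label label max_chars = wrap_axis_label_alt label max_chars := by
  have hmem : ' ' ∈ label.toList := by
    rw [pvSplitOn_eq, pvSpl_length] at h2
    have : 0 < label.toList.count ' ' := by omega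
    exact List.count_pos_iff.mp this
  have hii : PySem.Chars.isIn [' '] label.toList = true := by
    rw [PySem.Chars.isIn_iff_infix]
    rw [List.singleton_infix_iff]
    exact hmem
  have hlen2 : 2 ≤ (pvSpl label.toList).length := by
    rw [pvSplitOn_eq] at h2
    omega
  simp only [wrap_axis_label, wrap_axis_label_alt]
  rw [if_neg h1, if_neg h2, if_neg (by simp [hii]; simpa [PySem.Chars.len_eq] using h1 : ¬ (PySem.Chars.len label.toList ≤ max_chars ∨ PySem.Chars.isIn [' '] label.toList = false))]
  set t := PySem.Int.floordiv (PySem.Chars.len label.toList) 2 with ht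
  rw [PySem.List.slice_to_neg_one]
  rw [pvFoldA_eq_sel t, pvFoldB_eq_sel t]
  rw [pvSplitOn_eq]
  -- B candidate list: peel the sentinel space at position 0
  rw [show pvCandB t (' ' :: label.toList) 0 = (|(0:Int) - 1 - t|, 0) :: pvCandB t label.toList (0 + 1) from by rw [pvCandB, if_pos rfl]]
  have hne0 : pvSpl label.toList ≠ [] := by
    intro h
    rw [h] at hlen2
    simp at hlen2
  have htn : t = ((label.toList.length / 2 : Nat) : Int) := by
    rw [ht, PySem.Chars.len_eq]
    exact_mod_cast PySem.Int.floordiv_natCast label.toList.length 2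
  have h2t : 2 * t ≤ (label.toList.length : Int) ∧ (label.toList.length : Int) ≤ 2 * t + 1 := by
    rw [htn]
    omega
  have hcorr := pvCorr t (pvSpl label.toList) (pvSpl_nospace label.toList) hne0 1 0
  rw [pvIntercalate_pvSpl] at hcorr
  have hne : pvCandB t label.toList (0 + 1) ≠ [] := by
    intro h
    have hl := List.Forall₂.length_eq hcorr
    rw [h, pvCandA_length] at hl
    simp at hl
    omega
  have hbound : ∀ p ∈ pvCandB t label.toList (0 + 1), p.1 < |(0 : Int) - 1 - t| := by
    intro p hp
    obtain ⟨he, hge, hlt⟩ := pvCandB_mem t label.toList (0 + 1) p hp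
    rw [he]
    have habs1 : |(0 : Int) - 1 - t| = 1 + t := by
      rw [abs_of_nonpos (by omega)]
      ring
    rcases abs_cases (p.2 - 1 - t) with ⟨ha, _⟩ | ⟨ha, _⟩ <;> rw [ha, habs1] <;> omega
  rw [pvSel_cons_of_lt _ _ _ hne hbound]
  have hF := List.Forall₂.imp
    (R := fun p q : Int × Int => p.1 = q.1 ∧
      ∃ n : Nat, n + 1 < (pvSpl label.toList).length ∧ p.2 = 1 + n ∧
        q.2 = 0 + (pvBnd (pvSpl label.toList) (n + 1) : Int))
    (S := fun p q : Int × Int => p.1 = q.1 ∧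
      ((p.2 = 0 ∧ q.2 = 0) ∨ ∃ n : Nat, n + 1 < (pvSpl label.toList).length ∧ p.2 = 1 + n ∧
        q.2 = (pvBnd (pvSpl label.toList) (n + 1) : Int)))
    (by rintro p q ⟨hf, n, hn, hp, hq⟩
        exact ⟨hf, Or.inr ⟨n, hn, hp, by rw [hq]; ring⟩⟩)
    hcorr
  have hsel := pvSel_rel
    (fun x y : Int => (x = 0 ∧ y = 0) ∨ ∃ n : Nat, n + 1 < (pvSpl label.toList).length ∧
      x = 1 + n ∧ y = (pvBnd (pvSpl label.toList) (n + 1) : Int))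
    _ _ hF (1000000000, 0) (1000000000, 0) rfl (Or.inl ⟨rfl, rfl⟩)
  obtain ⟨-, hP⟩ := hsel
  congr 1
  rcases hP with ⟨hx, hy⟩ | ⟨m, hm, hx, hy⟩
  · rw [hx, hy]
    have e1 : PySem.List.slice (pvSpl label.toList) none (some 0) = [] := by
      rw [PySem.List.slice_to _ (by norm_num)]
      simp
    have e2 : PySem.List.slice (pvSpl label.toList) (some 0) none = pvSpl label.toList := by
      rw [PySem.List.slice_from _ (by norm_num)]
      simp
    have e3 : PySem.List.slice (' ' :: label.toList) (some 1) (some 0) = ([] : List Char) := by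
      rw [PySem.List.slice_toNat _ (by norm_num) (by norm_num)]
      simp
    have e4 : PySem.List.slice (' ' :: label.toList) (some (0 + 1)) none = label.toList := by
      rw [PySem.List.slice_from _ (by norm_num)]
      simp
    rw [e1, e2, e3, e4]
    simp only [PySem.Chars.join]
    rw [pvIntercalate_pvSpl]
    simp [List.intercalate]
  · rw [hx, hy]
    have hbnd1 : 0 < pvBnd (pvSpl label.toList) (m + 1) := pvBnd_pos _ hne0 m
    obtain ⟨htk, hdr⟩ := pvTakeDropJoin m (pvSpl label.toList) hm
    have e1 : PySem.List.slice (pvSpl label.toList) none (some (1 + (m : Int)))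
        = (pvSpl label.toList).take (m + 1) := by
      rw [PySem.List.slice_to _ (by omega)]
      congr 1
      omega
    have e2 : PySem.List.slice (pvSpl label.toList) (some (1 + (m : Int))) none
        = (pvSpl label.toList).drop (m + 1) := by
      rw [PySem.List.slice_from _ (by omega)]
      congr 1
      omega
    have e3 : PySem.List.slice (' ' :: label.toList) (some 1)
        (some (pvBnd (pvSpl label.toList) (m + 1) : Int))
        = label.toList.take (pvBnd (pvSpl label.toList) (m + 1) - 1) := by
      rw [PySem.List.slice_toNat _ (by norm_num) (by omega)]
      simp
    have e4 : PySem.List.slice (' ' :: label.toList)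
        (some ((pvBnd (pvSpl label.toList) (m + 1) : Int) + 1)) none
        = label.toList.drop (pvBnd (pvSpl label.toList) (m + 1)) := by
      rw [PySem.List.slice_from _ (by omega)]
      have harg : ((pvBnd (pvSpl label.toList) (m + 1) : Int) + 1).toNat
          = pvBnd (pvSpl label.toList) (m + 1) + 1 := by omega
      rw [harg, List.drop_succ_cons]
    rw [e1, e2, e3, e4]
    simp only [PySem.Chars.join]
    rw [htk, hdr, pvIntercalate_pvSpl]

-- ===== VERDICT (by name: the statement is the Claim_ definition above) =====
theorem wrap_axis_label_spec : Claim_equal_wrap_axis_label := by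
  intro label max_chars _
  show wrap_axis_label label max_chars = wrap_axis_label_alt label max_chars
  by_cases h1 : PySem.Chars.len label.toList ≤ max_chars
  · simp only [wrap_axis_label, wrap_axis_label_alt]
    rw [if_pos h1, if_pos (Or.inl h1)]
  · by_cases h2 : ((PySem.Chars.splitOn label.toList [' ']).length : Int) ≤ 1
    · have hc0 : label.toList.count ' ' = 0 := by
        rw [pvSplitOn_eq, pvSpl_length] at h2
        omega
      have hnm : ' ' ∉ label.toList := List.count_eq_zero.mp hc0
      have hii : PySem.Chars.isIn [' '] label.toList = false := by
        rw [PySem.Chars.isIn_eq_false_iff]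
        rw [List.singleton_infix_iff]
        exact hnm
      simp only [wrap_axis_label, wrap_axis_label_alt]
      rw [if_neg h1, if_pos h2, if_pos (Or.inr hii)]
    · exact pvMain label max_chars h1 h2
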